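-- pv_equiv track=rewrite | github.com/sonusario/ARCHIVE | The-Archive/nBit_CycleTester.py | shortCycle2
-- ===== SOURCE A (Python) =====
-- def shortCycle2(arr):
--     d = len(arr) - 1
--     clone = list(arr)
--
--     while d >= 0:
--         if arr[d] == 0:
--             clone[d] = 1
--             return list(clone)
--         else:
--             clone[d] = 0
--         d -= 1
--
--     return list(clone)
-- ===== SOURCE B (Python) =====
-- def shortCycle2(arr):
--     pivot = -1
--     for i in range(len(arr)):
--         if arr[i] == 0:
--             pivot = i
--     if pivot == -1:
--         return [0] * len(arr)
--     return list(arr[:pivot]) + [1] + [0] * (len(arr) - pivot - 1)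
-- ===== Notes on version B (the rewrite author's own statement) =====
-- stated objective: alternative
-- what changed: B replaces A's right-to-left mutate-and-early-return loop over a clone with a full forward scan that records the last zero's index, then builds the result non-mutatingly by concatenating the prefix, a one, and a block of zeros (all zeros when no zero exists).
import Mathlib
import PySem

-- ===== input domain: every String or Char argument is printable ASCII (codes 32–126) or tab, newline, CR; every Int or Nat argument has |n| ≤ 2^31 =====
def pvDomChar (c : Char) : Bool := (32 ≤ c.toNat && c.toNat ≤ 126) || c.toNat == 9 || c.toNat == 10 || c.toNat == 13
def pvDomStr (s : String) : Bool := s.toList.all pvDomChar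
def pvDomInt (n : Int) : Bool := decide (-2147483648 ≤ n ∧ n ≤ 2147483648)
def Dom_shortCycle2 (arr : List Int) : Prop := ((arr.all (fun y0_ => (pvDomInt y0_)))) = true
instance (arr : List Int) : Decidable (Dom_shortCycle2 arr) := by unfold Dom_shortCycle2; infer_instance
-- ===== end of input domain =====

-- B replaces A's right-to-left mutate-and-early-return loop over a clone with a forward scan
-- recording the last zero's index and a non-mutating build by concatenation (objective: alternative).

-- ===== PORT A =====
-- A's while loop: d runs len(arr)-1 down to 0; fuel k encodes d+1 (k = 0 means d < 0, loop over).
-- arr[d] is always in range here, so getD's default is never used.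
def shortCycle2Go (arr : List Int) (clone : List Int) : Nat → List Int
  | 0 => clone
  | k + 1 =>
    if arr.getD k 0 = 0 then (clone.set k 1)    -- clone[d] = 1; return list(clone)
    else shortCycle2Go arr (clone.set k 0) k    -- clone[d] = 0; d -= 1

def shortCycle2 (arr : List Int) : List Int :=
  shortCycle2Go arr arr arr.length              -- d = len(arr)-1, clone = list(arr)

-- ===== PORT B =====
-- pivot = index of last 0, found by a full forward scan (arr[i] always in range).
def lastZero (arr : List Int) : Int :=
  (List.range arr.length).foldl (fun acc i => if arr.getD i 0 = 0 then (i : Int) else acc) (-1)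

def shortCycle2_alt (arr : List Int) : List Int :=
  let pivot := lastZero arr
  if pivot = -1 then List.replicate arr.length 0
  else arr.take pivot.toNat ++ [1] ++ List.replicate (arr.length - pivot.toNat - 1) 0

-- ===== PRECONDITION & SPEC =====
def Spec_shortCycle2 (arr : List Int) (out : List Int) : Prop := out = shortCycle2_alt arr
instance (arr : List Int) (out : List Int) : Decidable (Spec_shortCycle2 arr out) := by unfold Spec_shortCycle2; infer_instance

-- ===== CLAIM (what is proved, stated in full; the proofs are below) =====
def Claim_equal_shortCycle2 : Prop := ∀ (arr : List Int), Dom_shortCycle2 arr → Spec_shortCycle2 arr (shortCycle2 arr)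

-- ===== LEMMAS AND PROOFS =====

-- common reference semantics: binary increment-with-carry, last element first
def incRev : List Int → List Int
  | [] => []
  | x :: rest => if x = 0 then 1 :: rest else 0 :: incRev rest

def incSpec (arr : List Int) : List Int := (incRev arr.reverse).reverse

-- A's loop with fuel k only touches indices < k, so a common tail passes through.
theorem goA_append (k : Nat) : ∀ (arr clone : List Int) (x c : Int),
    k ≤ arr.length → clone.length = arr.length →
    shortCycle2Go (arr ++ [x]) (clone ++ [c]) k = shortCycle2Go arr clone k ++ [c] := by
  induction k with
  | zero => intro arr clone x c _ _; simp [shortCycle2Go]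
  | succ k ih =>
    intro arr clone x c hk hlen
    have hkl : k < arr.length := hk
    have h1 : (arr ++ [x]).getD k 0 = arr.getD k 0 := by
      simp [List.getD, List.getElem?_append_left hkl]
    have h2 : ∀ v : Int, (clone ++ [c]).set k v = clone.set k v ++ [c] := by
      intro v
      rw [List.set_append]
      simp [hlen ▸ hkl]
    simp only [shortCycle2Go, h1]
    split
    · exact h2 1
    · rw [h2 0, ih arr (clone.set k 0) x c (Nat.le_of_lt hkl) (by simp [hlen])]

theorem portA_eq_spec (arr : List Int) : shortCycle2 arr = incSpec arr := by
  induction arr using List.reverseRecOn with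
  | nil => simp [shortCycle2, shortCycle2Go, incSpec, incRev]
  | append_singleton arr x ih =>
    have hget : (arr ++ [x]).getD arr.length 0 = x := by
      simp [List.getD, List.getElem?_append_right (Nat.le_refl arr.length)]
    simp only [shortCycle2, List.length_append, List.length_cons, List.length_nil]
    simp only [shortCycle2Go, hget]
    by_cases hx : x = 0
    · simp [hx, List.set_append, incSpec, incRev]
    · rw [if_neg hx]
      have : (arr ++ [x]).set arr.length 0 = arr ++ [0] := by
        rw [List.set_append]; simp
      rw [this, goA_append arr.length arr arr x 0 (Nat.le_refl _) rfl]
      simp only [shortCycle2] at ih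
      simp [incSpec, incRev, hx, ih]

-- B-side: appending one element updates lastZero in the obvious way
theorem foldlz_congr (arr : List Int) (x : Int) :
    ∀ (l : List Nat) (acc : Int), (∀ i ∈ l, i < arr.length) →
    l.foldl (fun acc i => if (arr ++ [x]).getD i 0 = 0 then (i : Int) else acc) acc
      = l.foldl (fun acc i => if arr.getD i 0 = 0 then (i : Int) else acc) acc := by
  intro l
  induction l with
  | nil => intro acc _; rfl
  | cons i l ih =>
    intro acc h
    have hi : i < arr.length := h i (by simp)
    have : (arr ++ [x]).getD i 0 = arr.getD i 0 := by
      simp [List.getD, List.getElem?_append_left hi]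
    simp only [List.foldl_cons, this]
    exact ih _ (fun j hj => h j (by simp [hj]))

theorem lastZero_append (arr : List Int) (x : Int) :
    lastZero (arr ++ [x]) = if x = 0 then (arr.length : Int) else lastZero arr := by
  have hget : (arr ++ [x]).getD arr.length 0 = x := by
    simp [List.getD, List.getElem?_append_right (Nat.le_refl arr.length)]
  unfold lastZero
  rw [List.length_append, List.length_cons, List.length_nil,
      List.range_succ, List.foldl_append,
      foldlz_congr arr x _ _ (fun i hi => List.mem_range.mp hi)]
  simp only [List.foldl_cons, List.foldl_nil, hget]

theorem lastZero_shape (arr : List Int) :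
    lastZero arr = -1 ∨ ∃ p : Nat, lastZero arr = (p : Int) ∧ p < arr.length := by
  induction arr using List.reverseRecOn with
  | nil => left; rfl
  | append_singleton arr x ih =>
    rw [lastZero_append]
    by_cases hx : x = 0
    · right; exact ⟨arr.length, by simp [hx], by simp⟩
    · rw [if_neg hx]
      rcases ih with h | ⟨p, hp, hpl⟩
      · left; exact h
      · right; exact ⟨p, hp, by simp; omega⟩

theorem portB_eq_spec (arr : List Int) : shortCycle2_alt arr = incSpec arr := by
  induction arr using List.reverseRecOn with
  | nil => simp [shortCycle2_alt, lastZero, incSpec, incRev]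
  | append_singleton arr x ih =>
    unfold shortCycle2_alt
    rw [lastZero_append]
    by_cases hx : x = 0
    · rw [if_pos hx]
      have hne : (arr.length : Int) ≠ -1 := by omega
      simp only [hne, if_false, Int.toNat_natCast]
      rw [List.take_append]
      simp [hx, incSpec, incRev]
    · rw [if_neg hx]
      rcases lastZero_shape arr with h | ⟨p, hp, hpl⟩
      · rw [h, if_pos rfl]
        have ih' : (incRev arr.reverse).reverse = List.replicate arr.length 0 := by
          unfold shortCycle2_alt at ih
          rw [h] at ih
          simpa [incSpec] using ih.symm
        simp [incSpec, incRev, hx, List.replicate_succ', ih']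
      · have hne : (p : Int) ≠ -1 := by omega
        rw [hp]
        simp only [hne, if_false, Int.toNat_natCast]
        unfold shortCycle2_alt at ih
        rw [hp] at ih
        simp only [hne, if_false, Int.toNat_natCast] at ih
        have htake : (arr ++ [x]).take p = arr.take p := by
          rw [List.take_append]
          simp [Nat.sub_eq_zero_of_le (Nat.le_of_lt hpl)]
        have hrep : arr.length + 1 - p - 1 = (arr.length - p - 1) + 1 := by omega
        have ih' : (incRev arr.reverse).reverse
            = arr.take p ++ [1] ++ List.replicate (arr.length - p - 1) 0 := by
          simpa [incSpec] using ih.symm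
        rw [List.length_append, List.length_cons, List.length_nil, htake, hrep,
            List.replicate_succ']
        simp [incSpec, incRev, hx, ih', List.append_assoc]

-- ===== VERDICT (by name: the statement is the Claim_ definition above) =====
theorem shortCycle2_spec : Claim_equal_shortCycle2 := by
  intro arr _
  unfold Spec_shortCycle2
  rw [portA_eq_spec, portB_eq_spec]
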